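-- pv_equiv track=rewrite | github.com/matteobrancato/nda | app.py | detect_leave
-- ===== SOURCE A (Python) =====
-- def detect_leave(summary: str) -> str | None:
--     if not isinstance(summary, str):
--         return None
--     s = summary.lower()
--     if any(k in s for k in ["public holiday", "holiday"]):
--         return "Public Holiday"
--     if any(k in s for k in ["vacation", "ferie"]):
--         return "Vacation"
--     if any(k in s for k in ["sick", "malattia"]):
--         return "Sick Leave"
--     if any(k in s for k in ["pto", "personal leave", "permesso"]):
--         return "Personal Leave"
--     if "maternity" in s:
--         return "Maternity Leave"
--     if "paternity" in s:
--         return "Paternity Leave"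
--     if "bereavement" in s:
--         return "Bereavement Leave"
--     if "leave" in s:
--         return "Other Leave"
--     return None
-- ===== SOURCE B (Python) =====
-- # Order-independent reclassification: each keyword carries a numeric priority
-- # (0 = strongest). B takes the MINIMUM priority among all keywords occurring in
-- # the lowercased string and maps it through a label table; A's first-matching
-- # branch equals the minimum matching priority, since branches are checked in
-- # increasing priority order.
-- _PRIORITY = [
--     ("public holiday", 0), ("holiday", 0),
--     ("vacation", 1), ("ferie", 1),
--     ("sick", 2), ("malattia", 2),
--     ("pto", 3), ("personal leave", 3), ("permesso", 3),
--     ("maternity", 4), ("paternity", 5), ("bereavement", 6), ("leave", 7),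
-- ]
-- _LABELS = ["Public Holiday", "Vacation", "Sick Leave", "Personal Leave",
--            "Maternity Leave", "Paternity Leave", "Bereavement Leave", "Other Leave"]
--
-- def detect_leave(summary):
--     if not isinstance(summary, str):
--         return None
--     s = summary.lower()
--     best = min((g for kw, g in _PRIORITY if kw in s), default=None)
--     return None if best is None else _LABELS[best]
-- ===== Notes on version B (the rewrite author's own statement) =====
-- stated objective: alternative
-- what changed: Replaces the ordered first-match if/elif chain with an order-independent reduction: every keyword carries a numeric priority, B takes the minimum priority among all keywords occurring in the string and maps it through a label table (correct because A's branches are checked in increasing priority order, so first match = minimum matching priority).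
import Mathlib
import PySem

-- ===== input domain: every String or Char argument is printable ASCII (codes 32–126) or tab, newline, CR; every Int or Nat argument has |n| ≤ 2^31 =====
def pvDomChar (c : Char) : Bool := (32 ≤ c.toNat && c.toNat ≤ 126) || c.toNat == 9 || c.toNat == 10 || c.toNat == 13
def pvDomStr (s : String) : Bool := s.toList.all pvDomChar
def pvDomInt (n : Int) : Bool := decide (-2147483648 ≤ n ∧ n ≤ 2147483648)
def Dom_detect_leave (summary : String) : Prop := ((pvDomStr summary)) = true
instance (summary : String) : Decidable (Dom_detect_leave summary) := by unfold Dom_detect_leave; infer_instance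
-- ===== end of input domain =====

-- B replaces A's ordered first-match if/elif chain with an order-independent reduction:
-- a flat keyword→priority list, the minimum priority among keywords occurring in the
-- lowercased string, mapped through a label table (alternative decomposition, same cost).


-- ===== PORT A =====
def detect_leave (summary : String) : Option String :=
  let s := PySem.Str.lower summary
  if ["public holiday", "holiday"].any (fun k => PySem.Str.isIn k s) then some "Public Holiday"
  else if ["vacation", "ferie"].any (fun k => PySem.Str.isIn k s) then some "Vacation"
  else if ["sick", "malattia"].any (fun k => PySem.Str.isIn k s) then some "Sick Leave"
  else if ["pto", "personal leave", "permesso"].any (fun k => PySem.Str.isIn k s) then some "Personal Leave"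
  else if PySem.Str.isIn "maternity" s then some "Maternity Leave"
  else if PySem.Str.isIn "paternity" s then some "Paternity Leave"
  else if PySem.Str.isIn "bereavement" s then some "Bereavement Leave"
  else if PySem.Str.isIn "leave" s then some "Other Leave"
  else none

-- ===== PORT B =====
def kwPriority : List (String × Nat) :=
  [ ("public holiday", 0), ("holiday", 0),
    ("vacation", 1), ("ferie", 1),
    ("sick", 2), ("malattia", 2),
    ("pto", 3), ("personal leave", 3), ("permesso", 3),
    ("maternity", 4), ("paternity", 5), ("bereavement", 6), ("leave", 7) ]

def leaveLabels : List String :=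
  [ "Public Holiday", "Vacation", "Sick Leave", "Personal Leave",
    "Maternity Leave", "Paternity Leave", "Bereavement Leave", "Other Leave" ]

-- Source B's min((g for kw, g in _PRIORITY if kw in s), default=None):
-- the builtin min-with-default, ported as an Option-min fold over the same list
def minPriority (s : String) : List (String × Nat) → Option Nat → Option Nat
  | [], acc => acc
  | p :: rest, acc =>
      minPriority s rest
        (match acc with
         | none => if PySem.Str.isIn p.1 s then some p.2 else none
         | some b => if PySem.Str.isIn p.1 s then some (min b p.2) else some b)

def detect_leave_alt (summary : String) : Option String :=
  let s := PySem.Str.lower summary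
  match minPriority s kwPriority none with
  | none => none
  | some b => some (leaveLabels.getD b "")   -- priorities are 0..7, always in range

-- ===== PRECONDITION & SPEC =====
def Spec_detect_leave (summary : String) (out : Option String) : Prop := out = detect_leave_alt summary
instance (summary : String) (out : Option String) : Decidable (Spec_detect_leave summary out) := by unfold Spec_detect_leave; infer_instance

-- ===== CLAIM (what is proved, stated in full; the proofs are below) =====
def Claim_equal_detect_leave : Prop := ∀ (summary : String), Dom_detect_leave summary → Spec_detect_leave summary (detect_leave summary)

-- ===== LEMMAS AND PROOFS =====
-- Proof idea: case on keyword occurrence in kwPriority order. Once the first occurring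
-- keyword (priority g) is fixed, every later priority is ≥ g, so each later fold step is
-- `if _ then some (min g g') else some g` with min g g' = g, and `ite_self` collapses the
-- rest of B's fold; A's chain reduces to the same label under the same hypotheses.

-- ===== VERDICT (by name: the statement is the Claim_ definition above) =====
set_option maxHeartbeats 1000000 in
theorem detect_leave_spec : Claim_equal_detect_leave := by
  intro summary _
  unfold Spec_detect_leave detect_leave detect_leave_alt kwPriority
  simp only [List.any_cons, List.any_nil, Bool.or_false]
  by_cases h1 : PySem.Str.isIn "public holiday" (PySem.Str.lower summary) = true
  · simp_all [minPriority, leaveLabels]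
  by_cases h2 : PySem.Str.isIn "holiday" (PySem.Str.lower summary) = true
  · simp_all [minPriority, leaveLabels]
  by_cases h3 : PySem.Str.isIn "vacation" (PySem.Str.lower summary) = true
  · simp_all [minPriority, leaveLabels]
  by_cases h4 : PySem.Str.isIn "ferie" (PySem.Str.lower summary) = true
  · simp_all [minPriority, leaveLabels]
  by_cases h5 : PySem.Str.isIn "sick" (PySem.Str.lower summary) = true
  · simp_all [minPriority, leaveLabels]
  by_cases h6 : PySem.Str.isIn "malattia" (PySem.Str.lower summary) = true
  · simp_all [minPriority, leaveLabels]
  by_cases h7 : PySem.Str.isIn "pto" (PySem.Str.lower summary) = true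
  · simp_all [minPriority, leaveLabels]
  by_cases h8 : PySem.Str.isIn "personal leave" (PySem.Str.lower summary) = true
  · simp_all [minPriority, leaveLabels]
  by_cases h9 : PySem.Str.isIn "permesso" (PySem.Str.lower summary) = true
  · simp_all [minPriority, leaveLabels]
  by_cases h10 : PySem.Str.isIn "maternity" (PySem.Str.lower summary) = true
  · simp_all [minPriority, leaveLabels]
  by_cases h11 : PySem.Str.isIn "paternity" (PySem.Str.lower summary) = true
  · simp_all [minPriority, leaveLabels]
  by_cases h12 : PySem.Str.isIn "bereavement" (PySem.Str.lower summary) = true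
  · simp_all [minPriority, leaveLabels]
  by_cases h13 : PySem.Str.isIn "leave" (PySem.Str.lower summary) = true
  · simp_all [minPriority, leaveLabels]
  · simp_all [minPriority]
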